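-- pv_equiv track=rewrite | github.com/gitsual/transcript-combiner | mis_modulos/utils/vanilla_utils.py | find_sentence_of_word
-- ===== SOURCE A (Python) =====
-- def find_sentence_of_word(text, word):
--     """
--     This function takes two strings as input and returns a string.
--
--     If the input is not a string, it returns the input.
--     If the input is a string, it splits the string by '.' and then returns the sentence containing the word.
--     If the word is not in the sentence, it returns the sentence.
--     If the word is in the sentence, it returns the sentence containing the word.
--     If the word is in the sentence and the word contains '.', it returns the sentence containing the word without the '.'.
--
--     Parameters:
--         text (str): The text to be split by '.'
--         word (str): The word to be searched in the text
--
--     Returns: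
--         str: The sentence containing the word or the sentence itself.
--
--     Example:
--         find_sentence_of_word('This is a test. This is another.', 'test')
--
--             'This is a test.'
--     """
--
--     if isinstance(text, str) and isinstance(word, str):
--         text = text.split('.')
--         for sentence in text:
--             if word in sentence:
--                 return sentence
--     else:
--         return text
-- ===== SOURCE B (Python) =====
-- def find_sentence_of_word(text, word):
--     if isinstance(text, str) and isinstance(word, str):
--         buf = ""
--         for ch in text:
--             if ch == '.':
--                 if word in buf:
--                     return buf
--                 buf = ""
--             else:
--                 buf += ch
--         if word in buf:
--             return buf
--         return None
--     else:
--         return text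
-- ===== Notes on version B (the rewrite author's own statement) =====
-- stated objective: alternative
-- what changed: Instead of materialising text.split('.') and scanning the resulting list, B makes a single pass over the characters maintaining a current-segment buffer, testing the buffer at each '.' and once at the end.
import Mathlib
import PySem

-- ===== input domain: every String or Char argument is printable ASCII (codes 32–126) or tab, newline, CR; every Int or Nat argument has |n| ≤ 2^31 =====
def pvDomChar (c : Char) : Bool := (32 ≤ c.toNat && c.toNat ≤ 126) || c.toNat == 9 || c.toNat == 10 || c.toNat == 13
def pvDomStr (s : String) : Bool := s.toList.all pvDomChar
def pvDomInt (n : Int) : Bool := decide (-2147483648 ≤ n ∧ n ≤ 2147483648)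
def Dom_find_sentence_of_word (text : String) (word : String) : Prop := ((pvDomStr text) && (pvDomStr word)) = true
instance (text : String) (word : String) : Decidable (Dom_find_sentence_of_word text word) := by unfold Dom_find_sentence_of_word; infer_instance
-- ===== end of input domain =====

-- B replaces A's split('.')-then-scan with a single character pass keeping a current-segment buffer (alternative decomposition, same cost).
-- Under the type convention both arguments are str, so A's isinstance guard is always true; the implicit 'return None' is Option.none.

-- ===== PORT A =====
-- 'for sentence in text: if word in sentence: return sentence' over text.split('.')
def pvFindLoopA (word : String) : List (List Char) → Option String
  | [] => none
  | s :: rest => if PySem.Chars.isIn word.toList s then some (String.ofList s) else pvFindLoopA word rest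

def find_sentence_of_word (text : String) (word : String) : Option String :=
  pvFindLoopA word (PySem.Chars.splitOn text.toList ['.'])

-- ===== PORT B =====
-- single pass: buf is the current segment; on '.' test-and-reset, at the end test once
def pvGoB (word : List Char) : List Char → List Char → Option String
  | [], buf => if PySem.Chars.isIn word buf then some (String.ofList buf) else none
  | c :: rest, buf =>
      if c = '.' then
        if PySem.Chars.isIn word buf then some (String.ofList buf) else pvGoB word rest []
      else pvGoB word rest (buf ++ [c])

def find_sentence_of_word_alt (text : String) (word : String) : Option String :=
  pvGoB word.toList text.toList []

-- ===== PRECONDITION & SPEC =====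
def Spec_find_sentence_of_word (text : String) (word : String) (out : Option String) : Prop := out = find_sentence_of_word_alt text word
instance (text : String) (word : String) (out : Option String) : Decidable (Spec_find_sentence_of_word text word out) := by unfold Spec_find_sentence_of_word; infer_instance

-- ===== CLAIM (what is proved, stated in full; the proofs are below) =====
def Claim_equal_find_sentence_of_word : Prop := ∀ (text : String) (word : String), Dom_find_sentence_of_word text word → Spec_find_sentence_of_word text word (find_sentence_of_word text word)

-- ===== LEMMAS AND PROOFS =====

-- proof-side structural characterisation of split by a single '.'
def pvSplitDot : List Char → List (List Char)
  | [] => [[]]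
  | c :: rest => if c = '.' then [] :: pvSplitDot rest else (pvSplitDot rest).modifyHead (c :: ·)

lemma pvGo_dot (fuel : Nat) (l cur : List Char) (acc : List (List Char)) (h : l.length < fuel) :
    PySem.Chars.splitOn.go ['.'] fuel l cur acc
      = acc.reverse ++ (pvSplitDot l).modifyHead (cur.reverse ++ ·) := by
  induction fuel generalizing l cur acc with
  | zero => omega
  | succ fuel ih =>
    cases l with
    | nil => simp [PySem.Chars.splitOn.go, pvSplitDot]
    | cons c rest =>
      by_cases hc : c = '.'
      · subst hc
        rw [show PySem.Chars.splitOn.go ['.'] (fuel+1) ('.' :: rest) cur acc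
              = PySem.Chars.splitOn.go ['.'] fuel rest [] (cur.reverse :: acc) by
            simp [PySem.Chars.splitOn.go, List.isPrefixOf]]
        rw [ih rest [] (cur.reverse :: acc) (by simpa using Nat.lt_of_succ_lt_succ h)]
        cases hsd : pvSplitDot rest with
        | nil => simp [pvSplitDot, hsd]
        | cons a as => simp [pvSplitDot, hsd]
      · rw [show PySem.Chars.splitOn.go ['.'] (fuel+1) (c :: rest) cur acc
              = PySem.Chars.splitOn.go ['.'] fuel rest (c :: cur) acc by
            have hb : ('.' == c) = false := by simp [Ne.symm hc]
            simp [PySem.Chars.splitOn.go, List.isPrefixOf, hb]]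
        rw [ih rest (c :: cur) acc (by simpa using Nat.lt_of_succ_lt_succ h)]
        cases hsd : pvSplitDot rest with
        | nil => simp [pvSplitDot, hsd, hc]
        | cons a as => simp [pvSplitDot, hsd, hc]

lemma pvSplitOn_eq (cs : List Char) : PySem.Chars.splitOn cs ['.'] = pvSplitDot cs := by
  rw [PySem.Chars.splitOn, pvGo_dot cs.length.succ cs [] [] (Nat.lt_succ_self _)]
  cases hsd : pvSplitDot cs with
  | nil => simp
  | cons a as => simp

lemma pvGoB_eq (word : String) (cs buf : List Char) :
    pvGoB word.toList cs buf = pvFindLoopA word ((pvSplitDot cs).modifyHead (buf ++ ·)) := by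
  induction cs generalizing buf with
  | nil => simp [pvGoB, pvSplitDot, pvFindLoopA]
  | cons c rest ih =>
    by_cases hc : c = '.'
    · subst hc
      simp only [pvGoB, pvSplitDot, if_pos]
      rw [ih []]
      cases hsd : pvSplitDot rest with
      | nil => simp [pvFindLoopA]
      | cons a as => simp [pvFindLoopA]
    · simp only [pvGoB, pvSplitDot, if_neg hc]
      rw [ih (buf ++ [c])]
      cases hsd : pvSplitDot rest with
      | nil => simp
      | cons a as => simp [List.append_assoc]

-- ===== VERDICT (by name: the statement is the Claim_ definition above) =====
theorem find_sentence_of_word_spec : Claim_equal_find_sentence_of_word := by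
  intro text word _
  unfold Spec_find_sentence_of_word find_sentence_of_word find_sentence_of_word_alt
  rw [pvSplitOn_eq, pvGoB_eq]
  cases hsd : pvSplitDot text.toList with
  | nil => simp
  | cons a as => simp
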